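-- pv_equiv track=rewrite | github.com/Mareenraj/raaki | scripts/update_ontology.py | normalize_relation_name
-- ===== SOURCE A (Python) =====
-- def normalize_relation_name(relation):
--     """Normalize relation names for consistency"""
--     if not relation:
--         return ""
--
--     # Convert to camelCase for relations
--     relation = relation.strip().lower()
--
--     # Handle common relation variations
--     replacements = {
--         'is_type_of': 'isTypeOf',
--         'has_method': 'hasMethod',
--         'has_property': 'hasProperty',
--         'throws_exception': 'throwsException',
--         'belongs_to': 'belongsTo',
--         'part_of': 'partOf',
--         'depends_on': 'dependsOn',
--         'is_a': 'isA',
--         'has_a': 'hasA'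
--     }
--
--     if relation in replacements:
--         return replacements[relation]
--
--     # Convert snake_case to camelCase
--     if '_' in relation:
--         parts = relation.split('_')
--         return parts[0] + ''.join(word.capitalize() for word in parts[1:])
--
--     return relation
-- ===== SOURCE B (Python) =====
-- def normalize_relation_name(relation):
--     """Normalize relation names to camelCase via a single character pass."""
--     if not relation:
--         return ""
--     out = []
--     capitalize_next = False
--     for c in relation.strip().lower():
--         if c == '_':
--             capitalize_next = True
--         elif capitalize_next:
--             out.append(c.upper())
--             capitalize_next = False
--         else:
--             out.append(c)
--     return ''.join(out)
-- ===== Notes on version B (the rewrite author's own statement) =====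
-- stated objective: simpler
-- what changed: Dropped the replacements dict (each value equals the generic conversion) and replaced split('_')/capitalize/join with a single left-to-right character pass carrying a capitalize_next flag.
import Mathlib
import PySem

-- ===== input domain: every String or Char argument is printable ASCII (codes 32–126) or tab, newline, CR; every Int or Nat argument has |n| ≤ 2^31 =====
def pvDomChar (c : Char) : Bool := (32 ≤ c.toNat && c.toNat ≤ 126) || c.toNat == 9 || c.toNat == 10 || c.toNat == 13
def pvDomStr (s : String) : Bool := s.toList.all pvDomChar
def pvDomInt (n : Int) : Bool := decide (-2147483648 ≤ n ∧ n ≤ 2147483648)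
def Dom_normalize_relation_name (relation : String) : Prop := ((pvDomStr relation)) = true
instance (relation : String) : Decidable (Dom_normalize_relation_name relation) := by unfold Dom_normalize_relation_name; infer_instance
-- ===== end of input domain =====

-- B replaces A's redundant replacements dict and split/capitalize/join with a single
-- left-to-right character pass carrying a capitalize_next flag (objective: simpler).

-- ===== PORT A =====
-- str.capitalize(): first char uppercased, the rest lowercased (ported by hand; exact on the ASCII domain)
def pyCapitalize (w : List Char) : List Char :=
  match w with
  | [] => []
  | c :: rest => PySem.Chars.upperChar c :: PySem.Chars.lower rest

def replacementsA : PySem.Dict (List Char) (List Char) :=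
  (((((((((PySem.Dict.empty.insert
    "is_type_of".toList "isTypeOf".toList).insert
    "has_method".toList "hasMethod".toList).insert
    "has_property".toList "hasProperty".toList).insert
    "throws_exception".toList "throwsException".toList).insert
    "belongs_to".toList "belongsTo".toList).insert
    "part_of".toList "partOf".toList).insert
    "depends_on".toList "dependsOn".toList).insert
    "is_a".toList "isA".toList).insert
    "has_a".toList "hasA".toList)

-- A's reassigned 'relation' (relation.strip().lower()) and 'parts' are written inline;
-- 'replacements[relation]' is the getD lookup guarded by the membership test, as in A.
def normalize_relation_name (relation : String) : String :=
  if relation = "" then ""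
  else
    if replacementsA.contains (PySem.Chars.lower (PySem.Chars.strip relation.toList)) then
      String.ofList (replacementsA.getD (PySem.Chars.lower (PySem.Chars.strip relation.toList)) [])
    else if PySem.Chars.isIn ['_'] (PySem.Chars.lower (PySem.Chars.strip relation.toList)) then
      String.ofList (PySem.List.pyGetD (PySem.Chars.splitOn (PySem.Chars.lower (PySem.Chars.strip relation.toList)) ['_']) 0 [] ++
        PySem.Chars.join [] ((PySem.List.slice (PySem.Chars.splitOn (PySem.Chars.lower (PySem.Chars.strip relation.toList)) ['_']) (some 1) none).map pyCapitalize))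
    else String.ofList (PySem.Chars.lower (PySem.Chars.strip relation.toList))

-- ===== PORT B =====
def bLoop : List Char → Bool → List Char
  | [], _ => []
  | c :: rest, capNext =>
    if c = '_' then bLoop rest true
    else if capNext then PySem.Chars.upperChar c :: bLoop rest false
    else c :: bLoop rest false

def normalize_relation_name_alt (relation : String) : String :=
  if relation = "" then ""
  else String.ofList (bLoop (PySem.Chars.lower (PySem.Chars.strip relation.toList)) false)

-- ===== PRECONDITION & SPEC =====
def Spec_normalize_relation_name (relation : String) (out : String) : Prop := out = normalize_relation_name_alt relation
instance (relation : String) (out : String) : Decidable (Spec_normalize_relation_name relation out) := by unfold Spec_normalize_relation_name; infer_instance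

-- ===== CLAIM (what is proved, stated in full; the proofs are below) =====
def Claim_equal_normalize_relation_name : Prop := ∀ (relation : String), Dom_normalize_relation_name relation → Spec_normalize_relation_name relation (normalize_relation_name relation)

-- ===== LEMMAS AND PROOFS =====

theorem isupper_lowerChar (c : Char) : PySem.Chars.isupper (PySem.Chars.lowerChar c) = false := by
  unfold PySem.Chars.lowerChar PySem.Chars.isupper
  split_ifs with h
  · simp [Char.le_def, UInt32.le_iff_toNat_le] at h
    have hv : (Char.ofNat (c.toNat + 32)).toNat = c.toNat + 32 := by
      rw [Char.toNat_ofNat, if_pos]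
      unfold Nat.isValidChar
      omega
    simp [Char.le_def, UInt32.le_iff_toNat_le, hv]
    omega
  · simp [Char.le_def, UInt32.le_iff_toNat_le] at h ⊢
    omega

theorem lower_isupper (s : List Char) : ∀ c ∈ PySem.Chars.lower s, PySem.Chars.isupper c = false := by
  intro c hc
  simp [PySem.Chars.lower] at hc
  obtain ⟨a, -, rfl⟩ := hc
  exact isupper_lowerChar a

-- reference splitter: split on a single '_' separator (what str.split('_') computes)
def splitU : List Char → List (List Char)
  | [] => [[]]
  | c :: rest =>
    if c = '_' then [] :: splitU rest
    else
      match splitU rest with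
      | [] => [[c]]
      | p :: ps => (c :: p) :: ps

theorem splitU_ne_nil (l : List Char) : splitU l ≠ [] := by
  cases l with
  | nil => simp [splitU]
  | cons c rest =>
    simp only [splitU]
    split_ifs
    · simp
    · cases h : splitU rest <;> simp

theorem go_eq (fuel : Nat) : ∀ (l cur : List Char) (acc : List (List Char)), l.length ≤ fuel →
    PySem.Chars.splitOn.go ['_'] fuel l cur acc =
      acc.reverse ++ (cur.reverse ++ (splitU l).headD []) :: (splitU l).tail := by
  induction fuel with
  | zero =>
    intro l cur acc h
    have hl : l = [] := by cases l <;> simp_all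
    subst hl
    rw [PySem.Chars.splitOn.go.eq_def]
    simp [splitU]
  | succ n ih =>
    intro l cur acc h
    cases l with
    | nil =>
      rw [PySem.Chars.splitOn.go.eq_def]
      simp [splitU]
    | cons c rest =>
      rw [PySem.Chars.splitOn.go.eq_def]
      simp only [List.isPrefixOf, Bool.and_true]
      by_cases hc : c = '_'
      · subst hc
        simp only [beq_self_eq_true, if_pos]
        rw [ih _ _ _ (by simpa using Nat.le_of_succ_le_succ (by simpa using h))]
        obtain ⟨p, ps, hps⟩ : ∃ p ps, splitU rest = p :: ps := by
          cases hx : splitU rest with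
          | nil => exact absurd hx (splitU_ne_nil rest)
          | cons a as => exact ⟨a, as, rfl⟩
        simp [splitU, hps]
      · have : (['_'].isPrefixOf (c :: rest)) = false := by
          simp [List.isPrefixOf]
          exact fun hh => absurd hh.symm hc
        simp only [List.isPrefixOf] at this
        rw [if_neg (by simp_all)]
        rw [ih _ _ _ (by simpa using Nat.le_of_succ_le_succ (by simpa using h))]
        obtain ⟨p, ps, hps⟩ : ∃ p ps, splitU rest = p :: ps := by
          cases hx : splitU rest with
          | nil => exact absurd hx (splitU_ne_nil rest)
          | cons a as => exact ⟨a, as, rfl⟩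
        simp [splitU, hps, hc]

theorem splitOn_eq_splitU (l : List Char) : PySem.Chars.splitOn l ['_'] = splitU l := by
  unfold PySem.Chars.splitOn
  rw [go_eq _ _ _ _ (by omega)]
  obtain ⟨p, ps, hps⟩ : ∃ p ps, splitU l = p :: ps := by
    cases hx : splitU l with
    | nil => exact absurd hx (splitU_ne_nil l)
    | cons a as => exact ⟨a, as, rfl⟩
  simp [hps]

theorem mem_splitU_head : ∀ (l p : List Char) (ps : List (List Char)),
    splitU l = p :: ps → ∀ x ∈ p, x ∈ l := by
  intro l
  induction l with
  | nil =>
    intro p ps h x hx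
    simp only [splitU] at h
    injection h with h1 h2
    subst h1
    simp at hx
  | cons c rest ih =>
    intro p ps h x hx
    simp only [splitU] at h
    by_cases hc : c = '_'
    · rw [if_pos hc] at h
      obtain ⟨h1, -⟩ := List.cons.inj h
      simp [← h1] at hx
    · rw [if_neg hc] at h
      cases hr : splitU rest with
      | nil => exact absurd hr (splitU_ne_nil rest)
      | cons q qs =>
        rw [hr] at h
        obtain ⟨h1, -⟩ := List.cons.inj h
        subst h1
        rcases List.mem_cons.mp hx with rfl | hxq
        · exact List.mem_cons_self
        · exact List.mem_cons_of_mem _ (ih q qs hr x hxq)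

theorem lower_fix {l : List Char} (h : ∀ c ∈ l, PySem.Chars.isupper c = false) :
    PySem.Chars.lower l = l := by
  unfold PySem.Chars.lower
  rw [List.map_congr_left (fun c hc => ?_), List.map_id]
  unfold PySem.Chars.lowerChar
  simp [h c hc]

theorem bLoop_spec (l : List Char) (h : ∀ c ∈ l, PySem.Chars.isupper c = false) :
    bLoop l false = (splitU l).headD [] ++ (((splitU l).tail).map pyCapitalize).flatten
    ∧ bLoop l true = ((splitU l).map pyCapitalize).flatten := by
  induction l with
  | nil => simp [bLoop, splitU, pyCapitalize]
  | cons c rest ih =>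
    have hrest : ∀ c ∈ rest, PySem.Chars.isupper c = false :=
      fun x hx => h x (List.mem_cons_of_mem _ hx)
    obtain ⟨ihF, ihT⟩ := ih hrest
    obtain ⟨p, ps, hps⟩ : ∃ p ps, splitU rest = p :: ps := by
      cases hx : splitU rest with
      | nil => exact absurd hx (splitU_ne_nil rest)
      | cons a as => exact ⟨a, as, rfl⟩
    by_cases hc : c = '_'
    · subst hc
      constructor
      · simp only [bLoop, if_pos]
        rw [ihT]
        simp [splitU, hps]
      · simp only [bLoop, if_pos]
        rw [ihT]
        simp [splitU, hps, pyCapitalize]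
    · have hlp : PySem.Chars.lower p = p :=
        lower_fix (fun x hx => hrest x (mem_splitU_head rest p ps hps x hx))
      constructor
      · simp only [bLoop, if_neg hc]
        rw [ihF]
        simp [splitU, hc, hps]
      · simp only [bLoop, if_neg hc]
        rw [ihF]
        simp [splitU, hc, hps, pyCapitalize, hlp]

theorem bLoop_no_us {l : List Char} (h : '_' ∉ l) : bLoop l false = l := by
  induction l with
  | nil => rfl
  | cons c rest ih =>
    have hc : c ≠ '_' := fun hh => h (hh ▸ List.mem_cons_self)
    simp only [bLoop, if_neg hc, Bool.false_eq_true, if_false]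
    exact congrArg _ (ih fun hh => h (List.mem_cons_of_mem _ hh))

theorem join_nil_flatten (l : List (List Char)) : PySem.Chars.join [] l = l.flatten := by
  induction l with
  | nil => simp [PySem.Chars.join_nil]
  | cons p rest ih =>
    cases rest with
    | nil => simp [PySem.Chars.join, List.intercalate]
    | cons q qs =>
      rw [PySem.Chars.join_cons_cons]
      simp only [List.flatten_cons]
      rw [ih]
      simp

theorem main_eq (relation : String) :
    normalize_relation_name relation = normalize_relation_name_alt relation := by
  unfold normalize_relation_name normalize_relation_name_alt
  by_cases hre : relation = ""
  · simp [hre]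
  · rw [if_neg hre, if_neg hre]
    generalize hs : PySem.Chars.strip relation.toList = s
    have hlow := lower_isupper s
    generalize hr : PySem.Chars.lower s = r at hlow
    by_cases hc : replacementsA.contains r
    · rw [if_pos hc]
      have hmem : r = "has_a".toList ∨ r = "is_a".toList ∨ r = "depends_on".toList ∨
          r = "part_of".toList ∨ r = "belongs_to".toList ∨ r = "throws_exception".toList ∨
          r = "has_property".toList ∨ r = "has_method".toList ∨ r = "is_type_of".toList := by
        simpa [replacementsA, PySem.Dict.contains_insert, PySem.Dict.contains_empty,
          or_assoc] using hc
      rcases hmem with h | h | h | h | h | h | h | h | h <;> rw [h] <;> decide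
    · rw [if_neg hc]
      obtain ⟨p, ps, hps⟩ : ∃ p ps, splitU r = p :: ps := by
        cases hx : splitU r with
        | nil => exact absurd hx (splitU_ne_nil r)
        | cons a as => exact ⟨a, as, rfl⟩
      by_cases hu : PySem.Chars.isIn ['_'] r
      · rw [if_pos hu, splitOn_eq_splitU, hps]
        rw [(bLoop_spec r hlow).1, hps]
        have hsl : PySem.List.slice (p :: ps) (some 1) none = ps := by
          rw [PySem.List.slice_some_none]
          have h1 := PySem.List.clampIdx_natCast (p :: ps).length 1
          rw [show ((1 : Nat) : Int) = (1 : Int) from rfl] at h1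
          rw [h1, show min 1 (p :: ps).length = 1 by simp]
          rfl
        rw [hsl, join_nil_flatten]
        simp [pysem]
      · rw [if_neg hu]
        have hnu : '_' ∉ r := by
          intro hm
          have := PySem.Chars.isIn_eq_false_iff (sub := ['_']) (s := r)
          rw [Bool.not_eq_true] at hu
          have hni := this.mp hu
          obtain ⟨s1, t1, rfl⟩ := List.append_of_mem hm
          exact hni ⟨s1, t1, by simp⟩
        rw [bLoop_no_us hnu]

-- ===== VERDICT (by name: the statement is the Claim_ definition above) =====
theorem normalize_relation_name_spec : Claim_equal_normalize_relation_name := by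
  intro relation _
  unfold Spec_normalize_relation_name
  exact main_eq relation
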